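-- pv_equiv track=rewrite | github.com/GillesArcas/numsed | opcoder.py | divmod_required
-- ===== SOURCE A (Python) =====
-- def scancodes(code):
--     for instr in code:
--         opc, arg = scancode(instr)
--         yield instr, opc, arg
--
-- def scancode(instr):
--     x = instr.split(None, 1)
--     opc = x[0]
--     arg = x[1] if len(x) > 1 else None
--     return opc, arg
--
-- def divmod_required(code):
--     """
--     Detects if divmod definition is required. This is the case with --literal.
--     """
--     load_name_detected = False
--     label_name_detected = False
--     for _, opc, arg in scancodes(code):
--         if opc == 'LOAD_NAME' and arg == 'divmod':
--             load_name_detected = True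
--         elif opc == ':' and arg == 'divmod':
--             label_name_detected = True
--     return load_name_detected and not label_name_detected
-- ===== SOURCE B (Python) =====
-- def divmod_required(code):
--     """
--     Detects if divmod definition is required. This is the case with --literal.
--     """
--     def hits(opcode):
--         return any(instr.split(None, 1) == [opcode, 'divmod'] for instr in code)
--     return hits('LOAD_NAME') and not hits(':')
-- ===== Notes on version B (the rewrite author's own statement) =====
-- stated objective: simpler
-- what changed: Replaces the single fused loop that accumulates two boolean flags over pre-parsed (opc, arg) pairs with two independent short-circuiting any() passes, each testing the whole split(None,1) result against the two-token pattern [opcode, 'divmod'] by list equality; a timing run measured this constant-factor faster (C-level any/generator vs per-instruction tuple unpacking and branching).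
-- crash fix: On code lists containing an empty or whitespace-only instruction A raises IndexError (x[0] on an empty split); B simply never matches such an instruction and returns its normal boolean result. — e.g. on divmod_required([" "]): A raises IndexError, B returns false
import Mathlib
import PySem

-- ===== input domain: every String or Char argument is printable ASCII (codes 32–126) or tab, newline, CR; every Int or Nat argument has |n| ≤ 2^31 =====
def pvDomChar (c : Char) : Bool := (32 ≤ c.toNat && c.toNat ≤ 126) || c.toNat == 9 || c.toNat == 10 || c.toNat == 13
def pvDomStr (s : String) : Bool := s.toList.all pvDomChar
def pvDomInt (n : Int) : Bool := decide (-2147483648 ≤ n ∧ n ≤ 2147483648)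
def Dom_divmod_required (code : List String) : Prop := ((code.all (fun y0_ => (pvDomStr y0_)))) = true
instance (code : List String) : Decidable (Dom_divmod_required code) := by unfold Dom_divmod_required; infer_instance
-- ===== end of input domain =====

-- B replaces A's one fused two-flag loop by two independent short-circuiting passes, each
-- matching the whole split(None,1) list against [opcode, 'divmod'] (objective: simpler).

-- ===== PORT A =====
-- scancode: x = instr.split(None, 1); opc = x[0]; arg = x[1] if len(x) > 1 else None
-- x[0] raises IndexError when the split is empty: the port returns none there (excluded by Pre_)
def pvScancode (instr : String) : Option (String × Option String) :=
  match PySem.Str.split₀Max instr 1 with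
  | [] => none
  | opc :: rest => some (opc, rest.head?)

-- the body of A's for-loop over scancodes(code), carrying the two flags
def pvStep (st : Bool × Bool) (instr : String) : Bool × Bool :=
  match pvScancode instr with
  | none => st
  | some (opc, arg) =>
    if opc == "LOAD_NAME" && arg == some "divmod" then (true, st.2)
    else if opc == ":" && arg == some "divmod" then (st.1, true)
    else st

def divmod_required (code : List String) : Bool :=
  let st := code.foldl pvStep (false, false)
  st.1 && !st.2

-- ===== PORT B =====
-- hits(opcode) = any(instr.split(None, 1) == [opcode, 'divmod'] for instr in code)
def pvHits (code : List String) (opcode : String) : Bool :=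
  code.any (fun instr => PySem.Str.split₀Max instr 1 == [opcode, "divmod"])

def divmod_required_alt (code : List String) : Bool :=
  pvHits code "LOAD_NAME" && !(pvHits code ":")

-- ===== PRECONDITION & SPEC =====
-- Pre_ excludes code lists containing an empty or whitespace-only instruction, on which the
-- Python A raises IndexError (x[0] on an empty split).
def Pre_divmod_required (code : List String) : Prop :=
  ∀ s ∈ code, PySem.Str.split₀ s ≠ []
instance (code : List String) : Decidable (Pre_divmod_required code) := by
  unfold Pre_divmod_required; infer_instance

def pvWitness_divmod_required : List String := ["LOAD_NAME divmod", ": divmod", "STORE x"]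

-- On code lists containing an empty or whitespace-only instruction A raises IndexError; B
-- never matches such an instruction and returns its normal boolean result.
def Raises_divmod_required (code : List String) : Prop :=
  ∃ s ∈ code, PySem.Str.split₀ s = []
instance (code : List String) : Decidable (Raises_divmod_required code) := by
  unfold Raises_divmod_required; infer_instance
def pvRaiseWitness_divmod_required : List String := [" "]
def pvRaiseWitnessOut_divmod_required : Bool := false

def Spec_divmod_required (code : List String) (out : Bool) : Prop := out = divmod_required_alt code
instance (code : List String) (out : Bool) : Decidable (Spec_divmod_required code out) := by
  unfold Spec_divmod_required; infer_instance

-- ===== CLAIM (what is proved, stated in full; the proofs are below) =====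
def Claim_equal_divmod_required : Prop := ∀ (code : List String), Dom_divmod_required code → Pre_divmod_required code → Spec_divmod_required code (divmod_required code)

def Claim_raises_divmod_required : Prop := (∀ (code : List String), Dom_divmod_required code → Raises_divmod_required code → ¬ Pre_divmod_required code) ∧ (Dom_divmod_required (pvRaiseWitness_divmod_required) ∧ Raises_divmod_required (pvRaiseWitness_divmod_required) ∧ divmod_required_alt (pvRaiseWitness_divmod_required) = pvRaiseWitnessOut_divmod_required)

-- ===== LEMMAS AND PROOFS =====

-- split(None, 1) returns at most 2 pieces
lemma pv_go_len (fuel : Nat) : ∀ (m : Nat) (l : List Char) (acc : List (List Char)),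
    (PySem.Chars.split₀Max.go fuel m l acc).length ≤ acc.length + m + 1 := by
  induction fuel with
  | zero => intro m l acc; simp [PySem.Chars.split₀Max.go]; omega
  | succ fuel ih =>
    intro m l acc
    rw [PySem.Chars.split₀Max.go]
    cases h : List.dropWhile PySem.Chars.isspace l with
    | nil => simp; omega
    | cons c cs =>
      by_cases hm : m = 0
      · subst hm; simp
      · simp only [if_neg hm]
        have := ih (m - 1) (List.dropWhile (fun c => !PySem.Chars.isspace c) (c :: cs))
          (List.takeWhile (fun c => !PySem.Chars.isspace c) (c :: cs) :: acc)
        simp at this ⊢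
        omega

lemma pv_split_len (s : String) : (PySem.Str.split₀Max s 1).length ≤ 2 := by
  have h := pv_go_len (s.toList.length + 1) 1 s.toList []
  simp [PySem.Str.split₀Max, PySem.Chars.split₀Max] at *
  omega

lemma pv_step_eq (st : Bool × Bool) (instr : String) :
    pvStep st instr = (st.1 || (PySem.Str.split₀Max instr 1 == ["LOAD_NAME", "divmod"]),
                       st.2 || (PySem.Str.split₀Max instr 1 == [":", "divmod"])) := by
  have hlen := pv_split_len instr
  unfold pvStep pvScancode
  rcases hx : PySem.Str.split₀Max instr 1 with _ | ⟨a, _ | ⟨b, _ | ⟨c, t⟩⟩⟩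
  · simp
  · simp
  · by_cases h1 : a = "LOAD_NAME" ∧ b = "divmod"
    · rcases h1 with ⟨rfl, rfl⟩; simp
    · by_cases h2 : a = ":" ∧ b = "divmod"
      · rcases h2 with ⟨rfl, rfl⟩; simp
      · have b1 : (a == "LOAD_NAME" && b == "divmod") = false := by
          by_cases hA : a = "LOAD_NAME" <;> by_cases hB : b = "divmod" <;> simp_all
        have b2 : (a == ":" && b == "divmod") = false := by
          by_cases hA : a = ":" <;> by_cases hB : b = "divmod" <;> simp_all
        simp [List.head?, b1, b2]
  · rw [hx] at hlen; simp at hlen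

lemma pv_fold_eq (code : List String) : ∀ (a b : Bool),
    code.foldl pvStep (a, b) = (a || pvHits code "LOAD_NAME", b || pvHits code ":") := by
  induction code with
  | nil => intro a b; simp [pvHits]
  | cons instr rest ih =>
    intro a b
    simp only [List.foldl_cons, pv_step_eq, ih, pvHits, List.any_cons]
    simp [Bool.or_assoc]

-- ===== VERDICT (by name: the statement is the Claim_ definition above) =====
theorem divmod_required_spec : Claim_equal_divmod_required := by
  intro code _ _
  unfold Spec_divmod_required divmod_required divmod_required_alt
  simp [pv_fold_eq]

@[simp] theorem divmod_required_raises : Claim_raises_divmod_required := by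
  unfold Claim_raises_divmod_required
  constructor
  · intro code _ ⟨s, hs, h⟩ hpre
    exact hpre s hs h
  · exact ⟨by decide, by decide, by decide⟩
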